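-- pv_equiv track=rewrite | github.com/3zk1m0/advent-of-code | day_16.py | calculate_row
-- ===== SOURCE A (Python) =====
-- repeat_pattern = [0, 1, 0, -1]
--
-- def calculate_row(input_data, times):
--     input_data = [number for number in input_data]
--     pattern = []
--     while len(pattern)-1 < len(input_data):
--         for item in repeat_pattern:
--             pattern += [item]*times
--     del pattern[0]
--
--     total = sum([int(input_data[index]) * int(pattern[index]) for index in range(len(input_data))])
--
--     return str(total)[-1]
-- ===== SOURCE B (Python) =====
-- def calculate_row(input_data, times):
--     total = 0
--     for i, d in enumerate(input_data):
--         c = (0, 1, 0, -1)[((i + 1) // times) % 4]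
--         if c:
--             total += c * int(d)
--     return str(total)[-1]
-- ===== Notes on version B (the rewrite author's own statement) =====
-- stated objective: alternative
-- what changed: B never builds A's materialized repeating-pattern list (A regrows it by repeated list concatenation until it exceeds the input length); B computes each index's coefficient in closed form as (0,1,0,-1)[((i+1)//times)%4] in a single pass over enumerate(input_data) with O(1) extra space. Pre_ excludes times <= 0, on which A's pattern-building while loop never terminates.
import Mathlib
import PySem

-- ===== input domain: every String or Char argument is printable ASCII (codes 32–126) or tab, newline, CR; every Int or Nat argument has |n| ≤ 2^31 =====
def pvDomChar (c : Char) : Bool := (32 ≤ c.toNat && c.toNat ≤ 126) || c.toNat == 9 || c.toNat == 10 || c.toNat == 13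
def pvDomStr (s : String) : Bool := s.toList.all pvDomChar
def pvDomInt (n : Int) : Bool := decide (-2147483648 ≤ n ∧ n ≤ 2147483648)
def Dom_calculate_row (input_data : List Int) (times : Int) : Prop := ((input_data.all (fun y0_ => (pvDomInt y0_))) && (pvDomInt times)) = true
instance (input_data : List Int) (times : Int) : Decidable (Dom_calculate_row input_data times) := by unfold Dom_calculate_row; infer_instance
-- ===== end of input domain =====

-- B replaces A's materialized repeating-pattern list with a closed-form per-index
-- coefficient ((i+1)//times) % 4 looked up in (0,1,0,-1), one pass, O(1) extra space.

-- ===== PORT A =====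
def pvRepeatPattern : List Int := [0, 1, 0, -1]

-- the 'while len(pattern)-1 < len(input_data)' loop; fuel n+1 suffices whenever times ≥ 1
def pvBuildPattern (n : Nat) (times : Int) : Nat → List Int → List Int
  | 0, pat => pat
  | f + 1, pat =>
    if (pat.length : Int) - 1 < (n : Int) then
      pvBuildPattern n times f
        (pvRepeatPattern.foldl (fun p item => p ++ List.replicate times.toNat item) pat)
    else pat

def calculate_row (input_data : List Int) (times : Int) : String :=
  let pattern0 := pvBuildPattern input_data.length times (input_data.length + 1) []
  let pattern := pattern0.drop 1      -- del pattern[0]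
  let total := ((List.range input_data.length).map
      (fun (index : Nat) => PySem.List.pyGetD input_data (index : Int) 0 *
                    PySem.List.pyGetD pattern (index : Int) 0)).sum
  match PySem.Str.pyGet? (PySem.Int.toStr total) (-1) with
  | some c => String.ofList [c]
  | none => ""

-- ===== PORT B =====
def calculate_row_alt (input_data : List Int) (times : Int) : String :=
  let total := (PySem.List.enumerate input_data).foldl
    (fun total p =>
      let c := PySem.List.pyGetD ([0, 1, 0, -1] : List Int)
        (PySem.Int.mod (PySem.Int.floordiv (p.1 + 1) times) 4) 0
      if c ≠ 0 then total + c * p.2 else total) 0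
  match PySem.Str.pyGet? (PySem.Int.toStr total) (-1) with
  | some c => String.ofList [c]
  | none => ""

-- ===== PRECONDITION & SPEC =====
-- Pre_ excludes times ≤ 0, on which A's pattern-building while loop never terminates.
def Pre_calculate_row (input_data : List Int) (times : Int) : Prop := 1 ≤ times
instance (input_data : List Int) (times : Int) : Decidable (Pre_calculate_row input_data times) := by unfold Pre_calculate_row; infer_instance
def pvWitness_calculate_row : List Int × Int := ([3, 1, 2], 1)

def Spec_calculate_row (input_data : List Int) (times : Int) (out : String) : Prop := out = calculate_row_alt input_data times
instance (input_data : List Int) (times : Int) (out : String) : Decidable (Spec_calculate_row input_data times out) := by unfold Spec_calculate_row; infer_instance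

-- ===== CLAIM (what is proved, stated in full; the proofs are below) =====
def Claim_equal_calculate_row : Prop := ∀ (input_data : List Int) (times : Int), Dom_calculate_row input_data times → Pre_calculate_row input_data times → Spec_calculate_row input_data times (calculate_row input_data times)

-- ===== LEMMAS AND PROOFS =====

def pvBlk (t : Nat) : List Int :=
  List.replicate t 0 ++ (List.replicate t 1 ++ (List.replicate t 0 ++ List.replicate t (-1)))

theorem pv_foldl_blk (t : Nat) (pat : List Int) :
    pvRepeatPattern.foldl (fun p item => p ++ List.replicate t item) pat = pat ++ pvBlk t := by
  simp [pvRepeatPattern, pvBlk, List.foldl]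

theorem pv_blk_length (t : Nat) : (pvBlk t).length = 4 * t := by
  simp [pvBlk]; ring

theorem pv_blk_getD (t j : Nat) (ht : 0 < t) (hj : j < 4 * t) :
    (pvBlk t).getD j 0 = ([0, 1, 0, -1] : List Int).getD (j / t % 4) 0 := by
  have hrep : ∀ (a : Int) (k : Nat), k < t → (List.replicate t a).getD k 0 = a := by
    intro a k hk
    simp [List.getD_eq_getElem?_getD, hk]
  unfold pvBlk
  by_cases h1 : j < t
  · rw [List.getD_append _ _ _ _ (by simpa using h1), hrep _ _ h1, Nat.div_eq_of_lt h1]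
    simp
  · rw [List.getD_append_right _ _ _ _ (by simpa using h1)]
    simp only [List.length_replicate]
    by_cases h2 : j < 2 * t
    · rw [List.getD_append _ _ _ _ (by simp only [List.length_replicate]; omega),
        hrep _ _ (by omega), Nat.div_eq_of_lt_le (k := 1) (by omega) (by omega)]
      simp
    · rw [List.getD_append_right _ _ _ _ (by simp only [List.length_replicate]; omega)]
      simp only [List.length_replicate]
      by_cases h3 : j < 3 * t
      · rw [List.getD_append _ _ _ _ (by simp only [List.length_replicate]; omega),
          hrep _ _ (by omega), Nat.div_eq_of_lt_le (k := 2) (by omega) (by omega)]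
        simp
      · rw [List.getD_append_right _ _ _ _ (by simp only [List.length_replicate]; omega)]
        simp only [List.length_replicate]
        rw [hrep _ _ (by omega), Nat.div_eq_of_lt_le (k := 3) (by omega) (by omega)]
        simp

theorem pv_flatten_replicate_getD (L : List Int) (hL : 0 < L.length) :
    ∀ (m j : Nat), j < m * L.length →
      ((List.replicate m L).flatten).getD j 0 = L.getD (j % L.length) 0 := by
  intro m
  induction m with
  | zero => intro j hj; omega
  | succ m ih =>
    intro j hj
    have hs : (m + 1) * L.length = m * L.length + L.length := by ring
    rw [List.replicate_succ, List.flatten_cons]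
    by_cases h : j < L.length
    · rw [List.getD_append _ _ _ _ h, Nat.mod_eq_of_lt h]
    · rw [List.getD_append_right _ _ _ _ (by omega), Nat.mod_eq_sub_mod (by omega)]
      exact ih (j - L.length) (by omega)

theorem pv_build_shape (n : Nat) (times : Int) :
    ∀ (f : Nat) (pat : List Int), ∃ m,
      pvBuildPattern n times f pat = pat ++ (List.replicate m (pvBlk times.toNat)).flatten := by
  intro f
  induction f with
  | zero => intro pat; exact ⟨0, by simp [pvBuildPattern]⟩
  | succ f ih =>
    intro pat
    unfold pvBuildPattern
    split
    · obtain ⟨m, hm⟩ := ih (pvRepeatPattern.foldl (fun p item => p ++ List.replicate times.toNat item) pat)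
      refine ⟨m + 1, ?_⟩
      rw [hm, pv_foldl_blk, List.replicate_succ, List.flatten_cons, List.append_assoc]
    · exact ⟨0, by simp⟩

theorem pv_build_len (n : Nat) (times : Int) (ht : 1 ≤ times) :
    ∀ (f : Nat) (pat : List Int), n + 1 ≤ pat.length + 4 * f →
      n + 1 ≤ (pvBuildPattern n times f pat).length := by
  intro f
  induction f with
  | zero => intro pat h; simpa [pvBuildPattern] using h
  | succ f ih =>
    intro pat h
    unfold pvBuildPattern
    split
    · apply ih
      rw [pv_foldl_blk, List.length_append, pv_blk_length]
      have : 1 ≤ times.toNat := by omega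
      omega
    · rename_i hcond
      have : (n : Int) ≤ (pat.length : Int) - 1 := by omega
      omega

theorem pv_mod4t_div (t j : Nat) (ht : 0 < t) : j % (4 * t) / t % 4 = j / t % 4 := by
  conv_rhs => rw [← Nat.div_add_mod j (4 * t)]
  rw [show 4 * t * (j / (4 * t)) = t * (4 * (j / (4 * t))) by ring,
    Nat.mul_add_div ht, Nat.mul_add_mod]

-- the coefficient at (0-based) index i of input_data, as B computes it (Nat form)
def pvCoef (t i : Nat) : Int := ([0, 1, 0, -1] : List Int).getD ((i + 1) / t % 4) 0

theorem pv_pattern_getD (n : Nat) (times : Int) (ht : 1 ≤ times) (i : Nat) (hi : i < n) :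
    ((pvBuildPattern n times (n + 1) []).drop 1).getD i 0 = pvCoef times.toNat i := by
  set t := times.toNat with htdef
  have ht' : 1 ≤ t := by omega
  obtain ⟨m, hm⟩ := pv_build_shape n times (n + 1) []
  rw [← htdef] at hm
  have hlen : n + 1 ≤ (pvBuildPattern n times (n + 1) []).length :=
    pv_build_len n times ht (n + 1) [] (by simp)
  rw [hm] at hlen ⊢
  simp only [List.nil_append] at hlen ⊢
  have hlen' : (List.replicate m (pvBlk t)).flatten.length = m * (4 * t) := by
    simp [List.length_flatten, pv_blk_length, List.sum_replicate, smul_eq_mul]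
  have hdrop : (((List.replicate m (pvBlk t)).flatten).drop 1).getD i 0
      = ((List.replicate m (pvBlk t)).flatten).getD (i + 1) 0 := by
    simp [List.getD_eq_getElem?_getD]
  rw [hdrop]
  rw [pv_flatten_replicate_getD (pvBlk t) (by rw [pv_blk_length]; omega) m (i + 1) (by rw [pv_blk_length]; omega)]
  rw [pv_blk_length, pv_blk_getD t _ (by omega) (Nat.mod_lt _ (by omega)),
    pv_mod4t_div t (i + 1) (by omega)]
  rfl

-- B's loop body adds pvCoef * digit (the `if c ≠ 0` guard only skips adding zero)
theorem pv_if_add (c acc d : Int) : (if c ≠ 0 then acc + c * d else acc) = acc + c * d := by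
  by_cases hc : c = 0
  · simp [hc]
  · simp [hc]

theorem pv_foldl_add_map {α : Type} (g : α → Int) (l : List α) (acc : Int) :
    l.foldl (fun t x => t + g x) acc = acc + (l.map g).sum := by
  induction l generalizing acc with
  | nil => simp
  | cons x l ih => rw [List.foldl_cons, ih, List.map_cons, List.sum_cons]; ring

theorem pv_enum_map (F : Int × Int → Int) (xs : List Int) :
    ∀ (s : Int), ((PySem.List.enumerate xs s).map F).sum
      = ((List.range xs.length).map (fun (i : Nat) => F (s + (i : Int), xs.getD i 0))).sum := by
  induction xs with
  | nil => intro s; simp [PySem.List.enumerate_nil]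
  | cons x xs ih =>
    intro s
    rw [PySem.List.enumerate_cons, List.map_cons, List.sum_cons, ih (s + 1),
      List.length_cons, List.range_succ_eq_map, List.map_cons, List.sum_cons, List.map_map]
    congr 1
    · simp
    · apply congrArg
      apply List.map_congr_left
      intro i _
      have h2 : s + 1 + (i : Int) = s + ((i : Int) + 1) := by ring
      simp [Function.comp, h2]

-- B's coefficient term equals pvCoef when times ≥ 1
theorem pv_coef_eq (times : Int) (ht : 1 ≤ times) (i : Nat) :
    PySem.List.pyGetD ([0, 1, 0, -1] : List Int)
      (PySem.Int.mod (PySem.Int.floordiv ((i : Int) + 1) times) 4) 0 = pvCoef times.toNat i := by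
  set t := times.toNat with htdef
  have htimes : times = (t : Int) := by omega
  have h1 : ((i : Int) + 1) = ((i + 1 : Nat) : Int) := by push_cast; ring
  rw [htimes, h1, PySem.Int.floordiv_natCast]
  rw [show (4 : Int) = ((4 : Nat) : Int) by norm_num, PySem.Int.mod_natCast]
  rw [PySem.List.pyGetD_natCast]
  rfl

theorem pv_totals_eq (input_data : List Int) (times : Int) (ht : 1 ≤ times) :
    ((List.range input_data.length).map
      (fun (index : Nat) => PySem.List.pyGetD input_data (index : Int) 0 *
        PySem.List.pyGetD ((pvBuildPattern input_data.length times (input_data.length + 1) []).drop 1) (index : Int) 0)).sum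
    = (PySem.List.enumerate input_data).foldl
        (fun total p =>
          let c := PySem.List.pyGetD ([0, 1, 0, -1] : List Int)
            (PySem.Int.mod (PySem.Int.floordiv (p.1 + 1) times) 4) 0
          if c ≠ 0 then total + c * p.2 else total) 0 := by
  simp only [pv_if_add]
  rw [pv_foldl_add_map, zero_add, pv_enum_map]
  apply congrArg
  apply List.map_congr_left
  intro i hi
  have hi' : i < input_data.length := List.mem_range.mp hi
  simp only [PySem.List.pyGetD_natCast, zero_add]
  rw [pv_pattern_getD input_data.length times ht i hi', pv_coef_eq times ht i]
  exact mul_comm _ _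

-- ===== VERDICT (by name: the statement is the Claim_ definition above) =====
theorem calculate_row_spec : Claim_equal_calculate_row := by
  intro input_data times _ hpre
  unfold Spec_calculate_row calculate_row calculate_row_alt
  simp only []
  rw [pv_totals_eq input_data times hpre]
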